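-- pv_equiv track=rewrite | github.com/fenghaitao/simics-7-packages-2025-38-linux64 | simics-7.57.0/linux64/lib/python-py3/simmod/tcf_agent/tcf_object_commands.py | str_from_char_array
-- ===== SOURCE A (Python) =====
-- def str_from_char_array(array, max_len):
--     to_end = max_len
--     assert isinstance(array, list)
--     string = ""
--     for char in array:
--         if char == 0:
--             break
--         string += chr(char)
--         to_end -= 1
--         if to_end == 0:
--             break
--     return string
-- ===== SOURCE B (Python) =====
-- def str_from_char_array(array, max_len):
--     assert isinstance(array, list)
--     end = array.index(0) if 0 in array else len(array)
--     if max_len > 0: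
--         end = min(end, max_len)
--     return ''.join(chr(c) for c in array[:end])
-- ===== Notes on version B (the rewrite author's own statement) =====
-- stated objective: simpler
-- what changed: Replaces A's character-by-character accumulator loop with a countdown counter by locating the stopping point first (index of the 0 terminator, capped by max_len when positive) and joining chr over one slice.
import Mathlib
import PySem

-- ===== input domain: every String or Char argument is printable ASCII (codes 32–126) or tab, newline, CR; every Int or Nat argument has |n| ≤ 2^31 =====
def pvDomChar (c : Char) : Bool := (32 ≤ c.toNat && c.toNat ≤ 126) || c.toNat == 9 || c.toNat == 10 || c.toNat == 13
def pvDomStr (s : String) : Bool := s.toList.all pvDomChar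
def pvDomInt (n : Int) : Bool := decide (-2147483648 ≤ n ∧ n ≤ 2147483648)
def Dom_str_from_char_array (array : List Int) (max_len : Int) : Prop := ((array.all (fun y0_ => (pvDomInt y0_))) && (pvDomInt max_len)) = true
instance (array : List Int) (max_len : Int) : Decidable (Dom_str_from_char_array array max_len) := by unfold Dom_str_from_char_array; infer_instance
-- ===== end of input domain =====

-- B replaces A's accumulator + countdown loop by locate-the-terminator (index of 0, capped by max_len when positive) then one join; objective: simpler.

-- ===== PORT A =====
-- the for-loop of A with its two accumulators (string, to_end); chr(c) ported as Char.ofNat c.toNat, exact on Pre_-admitted codes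
def strA_loop (array : List Int) (string : String) (to_end : Int) : String :=
  match array with
  | [] => string
  | c :: rest =>
    if c = 0 then string
    else
      let s := string ++ String.ofList [Char.ofNat c.toNat]  -- string += chr(char)
      let t := to_end - 1
      if t = 0 then s else strA_loop rest s t

def str_from_char_array (array : List Int) (max_len : Int) : String :=
  strA_loop array "" max_len

-- ===== PORT B =====
def str_from_char_array_alt (array : List Int) (max_len : Int) : String :=
  let e : Int := match PySem.List.index? array 0 with  -- array.index(0) if 0 in array else len(array)
    | some i => (i : Int)
    | none => (array.length : Int)
  let e : Int := if max_len > 0 then min e max_len else e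
  String.ofList ((PySem.List.slice array none (some e)).map (fun c => Char.ofNat c.toNat))  -- ''.join(chr(c) for c in array[:end])

-- ===== PRECONDITION & SPEC =====
-- Pre_ admits exactly the inputs whose consumed prefix (before the first 0, capped by a positive max_len) consists of
-- Unicode scalar values: outside it A either raises ValueError in chr (negative / > 0x10FFFF codes) or returns a
-- lone-surrogate str that is not representable as a Lean String (both programs return that same value there).
def Pre_str_from_char_array (array : List Int) (max_len : Int) : Prop :=
  ∀ c ∈ (if 0 < max_len then (array.takeWhile (· ≠ 0)).take max_len.toNat else array.takeWhile (· ≠ 0)),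
    0 ≤ c ∧ (c < 55296 ∨ (57344 ≤ c ∧ c < 1114112))
instance (array : List Int) (max_len : Int) : Decidable (Pre_str_from_char_array array max_len) := by unfold Pre_str_from_char_array; infer_instance

def pvWitness_str_from_char_array : List Int × Int := ([72, 105, 0, 99], 10)

def Spec_str_from_char_array (array : List Int) (max_len : Int) (out : String) : Prop := out = str_from_char_array_alt array max_len
instance (array : List Int) (max_len : Int) (out : String) : Decidable (Spec_str_from_char_array array max_len out) := by unfold Spec_str_from_char_array; infer_instance

-- ===== CLAIM (what is proved, stated in full; the proofs are below) =====
def Claim_equal_str_from_char_array : Prop := ∀ (array : List Int) (max_len : Int), Dom_str_from_char_array array max_len → Pre_str_from_char_array array max_len → Spec_str_from_char_array array max_len (str_from_char_array array max_len)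

-- ===== LEMMAS AND PROOFS =====

def pvChrL (l : List Int) : List Char := l.map (fun c => Char.ofNat c.toNat)

theorem pv_push (s : String) (a : Char) (l : List Char) :
    s ++ String.ofList [a] ++ String.ofList l = s ++ String.ofList (a :: l) := by
  rw [String.append_assoc, ← String.ofList_append, List.singleton_append]

-- the loop computes the capped takeWhile prefix, joined, appended to the accumulator
theorem strA_loop_eq (array : List Int) : ∀ (s : String) (t : Int),
    strA_loop array s t =
      s ++ String.ofList (pvChrL (if 0 < t then (array.takeWhile (· ≠ 0)).take t.toNat else array.takeWhile (· ≠ 0))) := by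
  induction array with
  | nil => intro s t; simp [strA_loop, pvChrL]
  | cons c rest ih =>
    intro s t
    by_cases hc : c = 0
    · subst hc; simp [strA_loop, pvChrL]
    · rw [strA_loop, if_neg hc, List.takeWhile_cons_of_pos (by simpa using hc)]
      by_cases ht : t - 1 = 0
      · have h1 : t = 1 := by omega
        subst h1
        simp [pvChrL]
      · rw [if_neg ht, ih]
        by_cases hpos : 0 < t
        · rw [if_pos hpos, if_pos (by omega : (0:Int) < t - 1)]
          have hsucc : t.toNat = (t - 1).toNat + 1 := by omega
          rw [hsucc, List.take_succ_cons]
          simp only [pvChrL, List.map_cons]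
          exact pv_push ..
        · rw [if_neg hpos, if_neg (by omega : ¬ (0:Int) < t - 1)]
          simp only [pvChrL, List.map_cons]
          exact pv_push ..

theorem tw_prefix (pre suf : List Int) (h : (0:Int) ∉ pre) :
    (pre ++ 0 :: suf).takeWhile (· ≠ 0) = pre := by
  induction pre with
  | nil => simp
  | cons a l ih =>
    simp only [List.mem_cons, not_or] at h
    rw [List.cons_append, List.takeWhile_cons_of_pos (by simpa using Ne.symm h.1), ih h.2]

theorem alt_eq (array : List Int) (max_len : Int) :
    str_from_char_array_alt array max_len =
      String.ofList (pvChrL (if 0 < max_len then (array.takeWhile (· ≠ 0)).take max_len.toNat else array.takeWhile (· ≠ 0))) := by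
  obtain ⟨k0, hk0e, hk0take⟩ : ∃ k0 : Nat,
      (match PySem.List.index? array 0 with | some i => (i:Int) | none => (array.length:Int)) = (k0:Int)
      ∧ array.take k0 = array.takeWhile (· ≠ 0) := by
    cases h : PySem.List.index? array 0 with
    | none =>
      refine ⟨array.length, rfl, ?_⟩
      have h0 : (0:Int) ∉ array := (PySem.List.index?_eq_none_iff array 0).mp h
      rw [List.take_length]
      symm
      rw [List.takeWhile_eq_self_iff]
      intro a ha
      have hne : a ≠ 0 := fun (he : a = 0) => h0 (he ▸ ha)
      simpa using hne
    | some i =>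
      obtain ⟨pre, suf, harr, hlen, hnot⟩ := (PySem.List.index?_eq_some_iff (xs := array) (v := 0) (k := i)).mp h
      refine ⟨i, rfl, ?_⟩
      subst harr
      rw [tw_prefix pre suf hnot, ← hlen]
      exact List.take_left
  simp only [str_from_char_array_alt]
  rw [hk0e]
  by_cases hm : max_len > 0
  · rw [if_pos hm, if_pos hm]
    rw [PySem.List.slice_to array (by omega : (0:Int) ≤ min (k0:Int) max_len)]
    have htn : (min (k0:Int) max_len).toNat = min k0 max_len.toNat := by omega
    rw [htn, ← hk0take, List.take_take, Nat.min_comm]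
    rfl
  · rw [if_neg hm, if_neg hm]
    rw [PySem.List.slice_to array (by omega : (0:Int) ≤ (k0:Int))]
    rw [Int.toNat_natCast, hk0take]
    rfl

-- ===== VERDICT (by name: the statement is the Claim_ definition above) =====
theorem str_from_char_array_spec : Claim_equal_str_from_char_array := by
  intro array max_len _ _
  unfold Spec_str_from_char_array str_from_char_array
  rw [strA_loop_eq, alt_eq]
  simp [pvChrL]
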